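-- pv_equiv track=rewrite | github.com/orwithout/noj.nwpu | 31.Number/more/31.solution3.py | Number3
-- ===== SOURCE A (Python) =====
-- def Number3(n):
--     max = (3 * n) // 5 * 5
--     for t in range(max, -1, -5):
--         for a2 in range(n, -1, -1):
--             a3a = min(n, t - a2)
--             for a3 in range(a3a, -1, -1):
--                 if (a2 + a3) % 3 == 0 and (t - a3) % 2 == 0 and (t - a2 - a3) <= n:
--                     return t
-- ===== SOURCE B (Python) =====
-- def Number3(n):
--     # Largest multiple of 5 that is t = a1+a2+a3 with 0<=ai<=n, a1+a2 even,
--     # a2+a3 divisible by 3.  Closed form: it is always (3n)//5*5, except that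
--     # for n % 15 in {5, 7, 10, 12} that candidate is infeasible and the answer
--     # is one step of 5 lower.
--     t = (3 * n) // 5 * 5
--     if n % 15 in (5, 7, 10, 12):
--         t -= 5
--     return t
-- ===== Notes on version B (the rewrite author's own statement) =====
-- stated objective: faster
-- what changed: Replaces the triple nested search loop by an O(1) closed form: the answer is (3n)//5*5, lowered by 5 exactly when n % 15 is in {5,7,10,12}.
-- outside the precondition, e.g. on Number3(-1): A returns None, B returns -5
import Mathlib
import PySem

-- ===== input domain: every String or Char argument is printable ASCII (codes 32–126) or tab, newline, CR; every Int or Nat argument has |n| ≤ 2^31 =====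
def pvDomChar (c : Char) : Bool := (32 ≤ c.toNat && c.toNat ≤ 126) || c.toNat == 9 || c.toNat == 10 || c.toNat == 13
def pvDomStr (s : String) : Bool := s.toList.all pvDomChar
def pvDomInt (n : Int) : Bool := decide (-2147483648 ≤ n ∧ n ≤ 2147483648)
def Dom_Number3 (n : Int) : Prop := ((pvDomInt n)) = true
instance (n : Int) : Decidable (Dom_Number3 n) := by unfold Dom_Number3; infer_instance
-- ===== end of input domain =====

-- B replaces A's O(n^3) triple nested descending search by an O(1) closed form
-- ((3n)//5*5, minus 5 exactly when n % 15 ∈ {5,7,10,12}); Pre_ excludes n < 0,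
-- where A returns None (no Int value).


-- ===== PORT A =====
-- innermost loop: 'for a3 in range(a3a, -1, -1): if … : return t' (k counts a3 down)
def pvLoopA3 (n t a2 : Int) (k : Nat) : Option Int :=
  if PySem.Int.mod (a2 + (k : Int)) 3 = 0 ∧ PySem.Int.mod (t - (k : Int)) 2 = 0 ∧
     t - a2 - (k : Int) ≤ n
  then some t
  else
    match k with
    | 0 => none
    | k' + 1 => pvLoopA3 n t a2 k'

-- 'a3a = min(n, t - a2)'; an empty range(a3a, -1, -1) runs zero iterations
def pvStartA3 (n t a2 : Int) : Option Int :=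
  if min n (t - a2) < 0 then none else pvLoopA3 n t a2 (min n (t - a2)).toNat

-- middle loop: 'for a2 in range(n, -1, -1): …' (k counts a2 down)
def pvLoopA2 (n t : Int) (k : Nat) : Option Int :=
  match pvStartA3 n t (k : Int) with
  | some r => some r
  | none =>
    match k with
    | 0 => none
    | k' + 1 => pvLoopA2 n t k'

def pvStartA2 (n t : Int) : Option Int :=
  if n < 0 then none else pvLoopA2 n t n.toNat

-- outer loop: 'for t in range(max, -1, -5): …' (c = fuel, one unit per iteration)
def pvLoopT (n : Int) (c : Nat) (t : Int) : Option Int :=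
  match c with
  | 0 => none
  | c' + 1 =>
    match pvStartA2 n t with
    | some r => some r
    | none => pvLoopT n c' (t - 5)

-- A returns None when the outer loop falls through (only for n < 0, outside Pre_);
-- the port returns 0 there.
def Number3 (n : Int) : Int :=
  match pvLoopT n (PySem.Int.floordiv (3 * n) 5 + 1).toNat
      (PySem.Int.floordiv (3 * n) 5 * 5) with
  | some t => t
  | none => 0

-- ===== PORT B =====
def Number3_alt (n : Int) : Int :=
  let t := PySem.Int.floordiv (3 * n) 5 * 5
  if PySem.Int.mod n 15 = 5 ∨ PySem.Int.mod n 15 = 7 ∨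
     PySem.Int.mod n 15 = 10 ∨ PySem.Int.mod n 15 = 12
  then t - 5 else t

-- ===== PRECONDITION & SPEC =====
-- Pre_ excludes n < 0: there A's outer range is empty and the Python returns None,
-- which is not an Int.
def Pre_Number3 (n : Int) : Prop := 0 ≤ n
instance (n : Int) : Decidable (Pre_Number3 n) := by unfold Pre_Number3; infer_instance
def pvWitness_Number3 : Int := 7

def Spec_Number3 (n : Int) (out : Int) : Prop := out = Number3_alt n
instance (n : Int) (out : Int) : Decidable (Spec_Number3 n out) := by unfold Spec_Number3; infer_instance

-- ===== CLAIM (what is proved, stated in full; the proofs are below) =====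
def Claim_equal_Number3 : Prop := ∀ (n : Int), Dom_Number3 n → Pre_Number3 n → Spec_Number3 n (Number3 n)

-- ===== LEMMAS AND PROOFS =====

-- proof-side findSome?/pyRange views of the three loops
def pvInnerA3 (n t a2 : Int) : Option Int :=
  (PySem.List.pyRange (min n (t - a2)) (-1) (-1)).findSome? (fun a3 =>
    if PySem.Int.mod (a2 + a3) 3 = 0 ∧ PySem.Int.mod (t - a3) 2 = 0 ∧ t - a2 - a3 ≤ n
    then some t else none)

def pvInnerA2 (n t : Int) : Option Int :=
  (PySem.List.pyRange n (-1) (-1)).findSome? (fun a2 => pvInnerA3 n t a2)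

lemma pvFindSome?_none {α β : Type} (l : List α) (f : α → Option β)
    (h : ∀ x ∈ l, f x = none) : l.findSome? f = none := by
  rw [List.findSome?_eq_none_iff]
  exact h

-- if every some produced by f is `some c`, findSome? is none or some c
lemma pvFindSome?_cases {α β : Type} (l : List α) (f : α → Option β) (c : β)
    (h : ∀ x ∈ l, f x = none ∨ f x = some c) :
    l.findSome? f = none ∨ l.findSome? f = some c := by
  induction l with
  | nil => left; rfl
  | cons a l ih =>
      rcases h a (List.mem_cons_self ..) with ha | ha
      · simpa [ha] using
          ih (fun x hx => h x (List.mem_cons_of_mem _ hx))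
      · right; rw [List.findSome?_cons, ha]

-- if every some is `some c` and one exists, findSome? = some c
lemma pvFindSome?_const {α β : Type} (l : List α) (f : α → Option β) (c : β)
    (hall : ∀ x ∈ l, f x = none ∨ f x = some c)
    (hex : ∃ x ∈ l, f x = some c) :
    l.findSome? f = some c := by
  induction l with
  | nil => rcases hex with ⟨x, hx, _⟩; cases hx
  | cons a l ih =>
      rcases hall a (List.mem_cons_self ..) with ha | ha
      · rw [List.findSome?_cons, ha]
        apply ih (fun x hx => hall x (List.mem_cons_of_mem _ hx))
        rcases hex with ⟨x, hx, hfx⟩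
        rcases List.mem_cons.mp hx with rfl | hx
        · rw [ha] at hfx; cases hfx
        · exact ⟨x, hx, hfx⟩
      · rw [List.findSome?_cons, ha]

-- cons form of range(a, -1, -5) for 0 ≤ a
lemma pvPyRange_m5_cons (a : Int) (h : 0 ≤ a) :
    PySem.List.pyRange a (-1) (-5) = a :: PySem.List.pyRange (a - 5) (-1) (-5) := by
  rw [PySem.List.pyRange_of_neg _ _ (by norm_num : (-5 : Int) < 0),
      PySem.List.pyRange_of_neg _ _ (by norm_num : (-5 : Int) < 0)]
  rw [if_pos (show (-1 : Int) < a by omega)]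
  have e1 : a - -1 + - -5 - 1 = a + 5 := by ring
  have e2 : a - 5 - -1 + - -5 - 1 = a := by ring
  have e5 : (- -5 : Int) = 5 := by norm_num
  rw [e1, e2, e5]
  by_cases h5 : (-1 : Int) < a - 5
  · rw [if_pos h5]
    have hc : ((a + 5) / 5).toNat = (a / 5).toNat + 1 := by omega
    rw [hc, List.range_succ_eq_map, List.map_cons, List.map_map]
    congr 1
    · norm_num
    · apply List.map_congr_left
      intro k _
      simp only [Function.comp_apply]
      push_cast
      ring
  · rw [if_neg h5]
    have hc : ((a + 5) / 5).toNat = 1 := by omega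
    rw [hc]
    norm_num [List.range_one]

lemma pvPyRange_m5_nil (a : Int) (h : a < 0) :
    PySem.List.pyRange a (-1) (-5) = [] := by
  rw [PySem.List.pyRange_of_neg _ _ (by norm_num : (-5 : Int) < 0),
      if_neg (by omega : ¬((-1 : Int) < a))]
  rfl

lemma pvLoopA3_eq (n t a2 : Int) (k : Nat) :
    pvLoopA3 n t a2 k = (PySem.List.pyRange (k : Int) (-1) (-1)).findSome? (fun x =>
      if PySem.Int.mod (a2 + x) 3 = 0 ∧ PySem.Int.mod (t - x) 2 = 0 ∧ t - a2 - x ≤ n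
      then some t else none) := by
  induction k with
  | zero =>
      rw [pvLoopA3]
      simp only [Nat.cast_zero]
      rw [PySem.List.pyRange_neg_one_cons (by norm_num : (-1 : Int) < 0),
          PySem.List.pyRange_neg_one_eq_nil (by norm_num : (0 : Int) - 1 ≤ -1)]
      simp only [List.findSome?_cons, List.findSome?_nil]
      split_ifs <;> rfl
  | succ k' ih =>
      rw [pvLoopA3]
      have hck : ((k' + 1 : Nat) : Int) = (k' : Int) + 1 := by push_cast; ring
      have hk0 : (0 : Int) ≤ (k' : Int) := Int.natCast_nonneg k'
      rw [hck, PySem.List.pyRange_neg_one_cons (by omega : (-1 : Int) < (k' : Int) + 1)]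
      simp only [List.findSome?_cons]
      have e : (k' : Int) + 1 - 1 = (k' : Int) := by ring
      rw [e, ← ih]
      split_ifs <;> rfl

lemma pvStartA3_eq (n t a2 : Int) :
    pvStartA3 n t a2 = pvInnerA3 n t a2 := by
  rw [pvStartA3, pvInnerA3]
  by_cases h : min n (t - a2) < 0
  · rw [if_pos h, PySem.List.pyRange_neg_one_eq_nil (by omega : min n (t - a2) ≤ -1)]
    rfl
  · rw [if_neg h, pvLoopA3_eq, Int.toNat_of_nonneg (by omega : (0 : Int) ≤ min n (t - a2))]

lemma pvLoopA2_eq (n t : Int) (k : Nat) :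
    pvLoopA2 n t k = (PySem.List.pyRange (k : Int) (-1) (-1)).findSome?
      (fun x => pvInnerA3 n t x) := by
  induction k with
  | zero =>
      rw [pvLoopA2]
      simp only [Nat.cast_zero]
      rw [pvStartA3_eq,
          PySem.List.pyRange_neg_one_cons (by norm_num : (-1 : Int) < 0),
          PySem.List.pyRange_neg_one_eq_nil (by norm_num : (0 : Int) - 1 ≤ -1)]
      simp only [List.findSome?_cons, List.findSome?_nil]
      cases pvInnerA3 n t 0 <;> rfl
  | succ k' ih =>
      rw [pvLoopA2]
      have hck : ((k' + 1 : Nat) : Int) = (k' : Int) + 1 := by push_cast; ring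
      have hk0 : (0 : Int) ≤ (k' : Int) := Int.natCast_nonneg k'
      rw [hck, pvStartA3_eq,
          PySem.List.pyRange_neg_one_cons (by omega : (-1 : Int) < (k' : Int) + 1)]
      simp only [List.findSome?_cons]
      have e : (k' : Int) + 1 - 1 = (k' : Int) := by ring
      rw [e, ← ih]
      cases pvInnerA3 n t ((k' : Int) + 1) <;> rfl

lemma pvStartA2_eq (n t : Int) :
    pvStartA2 n t = pvInnerA2 n t := by
  rw [pvStartA2, pvInnerA2]
  by_cases h : n < 0
  · rw [if_pos h, PySem.List.pyRange_neg_one_eq_nil (by omega : n ≤ -1)]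
    rfl
  · rw [if_neg h, pvLoopA2_eq, Int.toNat_of_nonneg (by omega : (0 : Int) ≤ n)]

lemma pvInnerA2_neg (n t : Int) (ht : t < 0) : pvInnerA2 n t = none := by
  apply pvFindSome?_none
  intro a2 ha2
  rw [PySem.List.mem_pyRange_neg_one] at ha2
  have hm : min n (t - a2) ≤ t - a2 := min_le_right _ _
  rw [pvInnerA3, PySem.List.pyRange_neg_one_eq_nil (by omega : min n (t - a2) ≤ -1)]
  rfl

lemma pvLoopT_none (n : Int) (c : Nat) (t : Int) (ht : t < 0) : pvLoopT n c t = none := by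
  induction c generalizing t with
  | zero => rfl
  | succ c ih =>
      rw [pvLoopT, pvStartA2_eq, pvInnerA2_neg n t ht, ih (t - 5) (by omega)]

lemma pvLoopT_eq (n : Int) (c : Nat) (t : Int) (h0 : 0 ≤ t) (hc : t < 5 * (c : Int)) :
    pvLoopT n c t = (PySem.List.pyRange t (-1) (-5)).findSome? (fun x => pvInnerA2 n x) := by
  induction c generalizing t with
  | zero => omega
  | succ c ih =>
      rw [pvLoopT, pvStartA2_eq, pvPyRange_m5_cons _ h0]
      simp only [List.findSome?_cons]
      cases hv : pvInnerA2 n t with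
      | some r => rfl
      | none =>
          by_cases hneg : t - 5 < 0
          · rw [pvLoopT_none n c _ hneg, pvPyRange_m5_nil _ hneg]
            rfl
          · exact ih (t - 5) (by omega) (by push_cast at hc ⊢; omega)

-- Number3 in findSome? form (on 0 ≤ n the fuel (3n)//5 + 1 covers the whole range)
lemma pvNumber3_view (n : Int) (h : 0 ≤ n) :
    Number3 n = (match (PySem.List.pyRange (PySem.Int.floordiv (3 * n) 5 * 5) (-1) (-5)).findSome?
      (fun x => pvInnerA2 n x) with | some t => t | none => 0) := by
  have hf5 : PySem.Int.floordiv (3 * n) 5 = (3 * n) / 5 :=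
    PySem.Int.floordiv_eq_ediv_of_pos (by norm_num)
  unfold Number3
  rw [hf5, pvLoopT_eq n _ _ (by omega) (by omega)]

lemma pvInnerA2_none (n t : Int)
    (h : ∀ a2 a3 : Int, 0 ≤ a2 → a2 ≤ n → 0 ≤ a3 → a3 ≤ n → a3 ≤ t - a2 →
      ¬((a2 + a3) % 3 = 0 ∧ (t - a3) % 2 = 0 ∧ t - a2 - a3 ≤ n)) :
    pvInnerA2 n t = none := by
  apply pvFindSome?_none
  intro a2 ha2
  rw [PySem.List.mem_pyRange_neg_one] at ha2
  unfold pvInnerA3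
  apply pvFindSome?_none
  intro a3 ha3
  rw [PySem.List.mem_pyRange_neg_one] at ha3
  obtain ⟨ha3l, ha3r⟩ := ha3
  rw [le_min_iff] at ha3r
  refine if_neg ?_
  rintro ⟨g1, g2, g3⟩
  rw [PySem.Int.mod_eq_emod_of_pos (by norm_num)] at g1
  rw [PySem.Int.mod_eq_emod_of_pos (by norm_num)] at g2
  exact h a2 a3 (by omega) (by omega) (by omega) (by omega) (by omega) ⟨g1, g2, g3⟩

-- feasibility of a candidate t, with residue-class witnesses a2 = n - (2n - d%2)%3,
-- a3 = n - d%2 for d = 3n - t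
lemma pvInnerA2_some (n t : Int) (h6 : 6 ≤ n)
    (hlo : 0 ≤ 3 * n - t) (hhi : 3 * n - t ≤ 6)
    (hkey : (2 * n - (3 * n - t) % 2) % 3 + (3 * n - t) % 2 ≤ 3 * n - t) :
    pvInnerA2 n t = some t := by
  apply pvFindSome?_const
  · intro a2 _
    unfold pvInnerA3
    apply pvFindSome?_cases
    intro a3 _
    split <;> simp
  · refine ⟨n - (2 * n - (3 * n - t) % 2) % 3, ?_, ?_⟩
    · rw [PySem.List.mem_pyRange_neg_one]
      constructor <;> omega
    · unfold pvInnerA3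
      apply pvFindSome?_const
      · intro a3 _
        split <;> simp
      · refine ⟨n - (3 * n - t) % 2, ?_, ?_⟩
        · rw [PySem.List.mem_pyRange_neg_one, le_min_iff]
          refine ⟨by omega, by omega, by omega⟩
        · have hcnd : PySem.Int.mod ((n - (2 * n - (3 * n - t) % 2) % 3) + (n - (3 * n - t) % 2)) 3 = 0 ∧
              PySem.Int.mod (t - (n - (3 * n - t) % 2)) 2 = 0 ∧
              t - (n - (2 * n - (3 * n - t) % 2) % 3) - (n - (3 * n - t) % 2) ≤ n := by
            rw [PySem.Int.mod_eq_emod_of_pos (by norm_num : (0:Int) < 3),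
                PySem.Int.mod_eq_emod_of_pos (by norm_num : (0:Int) < 2)]
            refine ⟨by omega, by omega, by omega⟩
          rw [if_pos hcnd]

-- the two ports agree on 0 ≤ n
lemma pvNumber3_eq (n : Int) (h : 0 ≤ n) : Number3 n = Number3_alt n := by
  by_cases hlt : n < 6
  · interval_cases n <;> decide
  · have h6 : 6 ≤ n := by omega
    have hf5 : PySem.Int.floordiv (3 * n) 5 = (3 * n) / 5 :=
      PySem.Int.floordiv_eq_ediv_of_pos (by norm_num)
    have hm15 : PySem.Int.mod n 15 = n % 15 :=
      PySem.Int.mod_eq_emod_of_pos (by norm_num)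
    by_cases hs : n % 15 = 5 ∨ n % 15 = 7 ∨ n % 15 = 10 ∨ n % 15 = 12
    · -- the top candidate (3n)//5*5 is infeasible; the answer is 5 lower
      have hnone : pvInnerA2 n (3 * n / 5 * 5) = none := by
        apply pvInnerA2_none
        intro a2 a3 h1 h2 h3 h4 h5
        rintro ⟨g1, g2, g3⟩
        rcases hs with hr | hr | hr | hr <;> omega
      have hsome : pvInnerA2 n (3 * n / 5 * 5 - 5) = some (3 * n / 5 * 5 - 5) := by
        rcases hs with hr | hr | hr | hr <;>
          exact pvInnerA2_some n _ h6 (by omega) (by omega) (by omega)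
      rw [pvNumber3_view n h, hf5, pvPyRange_m5_cons _ (by omega), pvPyRange_m5_cons _ (by omega)]
      simp only [List.findSome?_cons, hnone, hsome]
      simp only [Number3_alt, hm15, hf5]
      rw [if_pos hs]
    · -- the top candidate (3n)//5*5 is feasible
      have hsome : pvInnerA2 n (3 * n / 5 * 5) = some (3 * n / 5 * 5) := by
        push Not at hs
        have hr : n % 15 = 0 ∨ n % 15 = 1 ∨ n % 15 = 2 ∨ n % 15 = 3 ∨ n % 15 = 4 ∨
            n % 15 = 6 ∨ n % 15 = 8 ∨ n % 15 = 9 ∨ n % 15 = 11 ∨ n % 15 = 13 ∨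
            n % 15 = 14 := by omega
        rcases hr with hr | hr | hr | hr | hr | hr | hr | hr | hr | hr | hr <;>
          exact pvInnerA2_some n _ h6 (by omega) (by omega) (by omega)
      rw [pvNumber3_view n h, hf5, pvPyRange_m5_cons _ (by omega)]
      simp only [List.findSome?_cons, hsome]
      simp only [Number3_alt, hm15, hf5]
      rw [if_neg hs]

-- ===== VERDICT (by name: the statement is the Claim_ definition above) =====
theorem Number3_spec : Claim_equal_Number3 := by
  intro n _ hpre
  unfold Spec_Number3
  exact pvNumber3_eq n hpre
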